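-- pv_equiv track=rewrite | github.com/hosseindehghanipour1998/Python-Training | Solutions/Work With strings/Q2.py | iIndexOf
-- ===== SOURCE A (Python) =====
-- def iIndexOf(str1):
--     str1 = str1 + " "
--     len1 = len(str1)
--
--     i = 0
--     while i <len1:
--         if i==len(str1) or str1[i]==" " :
--             return i-1
--         i+=1
-- ===== SOURCE B (Python) =====
-- def iIndexOf(str1):
--     # tokenize-then-measure: first token of str1 + " " ends at the first space
--     return len((str1 + " ").split(" ", 1)[0]) - 1
-- ===== Notes on version B (the rewrite author's own statement) =====
-- stated objective: idiomatic
-- what changed: Replaces the index-hunting while-loop over characters with a tokenize-then-measure decomposition: append the trailing space as A does, split once at the first space, and return the length of the leading token minus one.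
import Mathlib
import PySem

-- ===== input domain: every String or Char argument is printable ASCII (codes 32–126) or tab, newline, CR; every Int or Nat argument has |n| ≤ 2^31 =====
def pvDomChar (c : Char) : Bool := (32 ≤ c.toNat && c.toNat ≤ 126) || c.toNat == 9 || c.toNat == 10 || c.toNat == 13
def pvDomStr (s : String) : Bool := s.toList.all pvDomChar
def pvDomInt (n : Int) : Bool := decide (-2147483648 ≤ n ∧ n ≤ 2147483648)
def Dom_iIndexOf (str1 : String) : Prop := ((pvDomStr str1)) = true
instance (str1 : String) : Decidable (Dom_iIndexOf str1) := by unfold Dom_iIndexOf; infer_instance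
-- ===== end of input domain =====

-- B replaces A's character-by-character while-loop with a split-once-then-measure
-- decomposition of the same O(n) cost (objective: idiomatic).

-- ===== PORT A =====
-- the while-loop: i walks up from 0; the fallthrough value 0 is unreachable because
-- the appended ' ' is always found before i reaches len1
def iIndexOfLoop (cs : List Char) (len1 : Nat) (i : Nat) : Int :=
  if i < len1 then
    if (i : Int) = (cs.length : Int) ∨ PySem.List.pyGet? cs (i : Int) = some ' ' then
      (i : Int) - 1
    else
      iIndexOfLoop cs len1 (i + 1)
  else 0
termination_by len1 - i

def iIndexOf (str1 : String) : Int :=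
  let str1' := str1 ++ " "
  let len1 := str1'.toList.length
  iIndexOfLoop str1'.toList len1 0

-- ===== PORT B =====
def iIndexOf_alt (str1 : String) : Int :=
  match PySem.Str.splitMax? (str1 ++ " ") " " 1 with
  | some (tok :: _) => (PySem.Str.len tok : Int) - 1
  | _ => 0  -- unreachable: split with a nonempty separator always yields a nonempty list

-- ===== PRECONDITION & SPEC =====
def Spec_iIndexOf (str1 : String) (out : Int) : Prop := out = iIndexOf_alt str1
instance (str1 : String) (out : Int) : Decidable (Spec_iIndexOf str1 out) := by unfold Spec_iIndexOf; infer_instance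

-- ===== CLAIM (what is proved, stated in full; the proofs are below) =====
def Claim_equal_iIndexOf : Prop := ∀ (str1 : String), Dom_iIndexOf str1 → Spec_iIndexOf str1 (iIndexOf str1)

-- ===== LEMMAS AND PROOFS =====

-- takeWhile ignores an appended element the predicate rejects
theorem takeWhile_append_stop {a : Type} (p : a → Bool) (l : List a) (x : a)
    (hx : p x = false) : (l ++ [x]).takeWhile p = l.takeWhile p := by
  induction l with
  | nil => simp [List.takeWhile, hx]
  | cons c t ih =>
    simp only [List.cons_append, List.takeWhile_cons]
    cases hpc : p c <;> simp [ih]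

-- A-side: the loop returns i + |takeWhile (≠ ' ') (drop i)| - 1 when a space lies ahead
theorem iIndexOfLoop_eq (cs : List Char) (i : Nat) (hmem : ' ' ∈ cs.drop i) :
    iIndexOfLoop cs cs.length i = (i : Int) + ((cs.drop i).takeWhile (· ≠ ' ')).length - 1 := by
  have hlt : i < cs.length := by
    by_contra h
    have : cs.drop i = [] := List.drop_eq_nil_of_le (by omega)
    simp [this] at hmem
  obtain ⟨c, rest, hd⟩ : ∃ c rest, cs.drop i = c :: rest :=
    List.exists_cons_of_ne_nil (by intro h; simp [h] at hmem)
  have hget : cs[i]? = some c := by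
    have h0 : (cs.drop i)[0]? = some c := by rw [hd]; rfl
    simpa using h0
  rw [iIndexOfLoop]
  rw [if_pos hlt]
  by_cases hc : c = ' '
  · have hsp : PySem.List.pyGet? cs (i : Int) = some ' ' := by
      simp [PySem.List.pyGet?_natCast, hget, hc]
    rw [if_pos (Or.inr hsp)]
    simp [hd, hc]
  · have hne : ¬ ((i : Int) = (cs.length : Int) ∨ PySem.List.pyGet? cs (i : Int) = some ' ') := by
      rintro (h | h)
      · omega
      · rw [PySem.List.pyGet?_natCast, hget] at h
        exact hc (Option.some_injective _ h)
    rw [if_neg hne]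
    have hdrop : cs.drop (i + 1) = rest := by
      have h1 : (cs.drop i).drop 1 = cs.drop (i + 1) := by
        rw [List.drop_drop]
      rw [← h1, hd]; rfl
    have hmem' : ' ' ∈ cs.drop (i + 1) := by
      rw [hdrop]
      rcases List.mem_cons.mp (hd ▸ hmem) with h | h
      · exact absurd h.symm hc
      · exact h
    rw [iIndexOfLoop_eq cs (i + 1) hmem']
    have htw : (cs.drop i).takeWhile (· ≠ ' ') = c :: (cs.drop (i + 1)).takeWhile (· ≠ ' ') := by
      rw [hd, hdrop]
      simp [hc]
    rw [htw]
    simp only [List.length_cons]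
    push_cast
    ring
termination_by cs.length - i

-- B-side: go with a nonempty accumulator prepends acc.reverse
theorem splitGo_acc (sep : List Char) (fuel m : Nat) (l cur : List Char) (acc : List (List Char)) :
    PySem.Chars.splitOnMax.go sep fuel m l cur acc
      = acc.reverse ++ PySem.Chars.splitOnMax.go sep fuel m l cur [] := by
  induction fuel generalizing m l cur acc with
  | zero => simp [PySem.Chars.splitOnMax.go]
  | succ fuel ih =>
    cases l with
    | nil => simp [PySem.Chars.splitOnMax.go]
    | cons c rest =>
      rw [PySem.Chars.splitOnMax.go, PySem.Chars.splitOnMax.go]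
      by_cases hm : m = 0
      · rw [if_pos hm, if_pos hm]; simp
      · rw [if_neg hm, if_neg hm]
        by_cases hp : sep.isPrefixOf (c :: rest) = true
        · rw [if_pos hp, if_pos hp]
          rw [ih, ih (acc := [cur.reverse])]
          simp
        · rw [if_neg hp, if_neg hp]
          exact ih m rest (c :: cur) acc

-- B-side: with maxsplit ≥ 1 and enough fuel, the first piece is the first token
theorem splitGo_head (fuel m : Nat) (l cur : List Char) (hf : l.length < fuel) (hm : m ≠ 0) :
    ∃ t, PySem.Chars.splitOnMax.go [' '] fuel m l cur []
      = (cur.reverse ++ l.takeWhile (· ≠ ' ')) :: t := by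
  induction fuel generalizing m l cur with
  | zero => omega
  | succ fuel ih =>
    cases l with
    | nil => exact ⟨[], by simp [PySem.Chars.splitOnMax.go]⟩
    | cons c rest =>
      rw [PySem.Chars.splitOnMax.go]
      rw [if_neg hm]
      by_cases hc : c = ' '
      · have hp : List.isPrefixOf [' '] (c :: rest) = true := by simp [List.isPrefixOf, hc]
        rw [if_pos hp]
        refine ⟨PySem.Chars.splitOnMax.go [' '] fuel (m - 1) (List.drop 1 (c :: rest)) [] [], ?_⟩
        rw [splitGo_acc]
        simp [hc]
      · have hp : ¬ List.isPrefixOf [' '] (c :: rest) = true := by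
          simp [List.isPrefixOf]; intro h; exact absurd h.symm hc
        rw [if_neg hp]
        obtain ⟨t, ht⟩ := ih m rest (c :: cur) (by simpa using Nat.lt_of_succ_lt_succ hf) hm
        refine ⟨t, ?_⟩
        rw [ht]
        simp [hc]

-- both ports compute |takeWhile (≠ ' ') str1| - 1
theorem iIndexOf_eq_canon (str1 : String) :
    iIndexOf str1 = ((str1.toList.takeWhile (· ≠ ' ')).length : Int) - 1 := by
  unfold iIndexOf
  have hcs : (str1 ++ " ").toList = str1.toList ++ [' '] := by simp
  simp only [hcs]
  have hmem : ' ' ∈ (str1.toList ++ [' ']).drop 0 := by simp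
  rw [iIndexOfLoop_eq _ 0 hmem]
  rw [List.drop_zero, takeWhile_append_stop _ _ _ (by simp)]
  push_cast
  ring

theorem iIndexOf_alt_eq_canon (str1 : String) :
    iIndexOf_alt str1 = ((str1.toList.takeWhile (· ≠ ' ')).length : Int) - 1 := by
  unfold iIndexOf_alt
  have hcs : (str1 ++ " ").toList = str1.toList ++ [' '] := by simp
  have hsep : (" " : String).toList = [' '] := rfl
  rw [PySem.Str.splitMax?]
  simp only [hcs, hsep]
  rw [PySem.Chars.splitMax?]
  rw [if_neg (by simp)]
  rw [PySem.Chars.splitOnMax]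
  rw [if_neg (by norm_num)]
  obtain ⟨t, ht⟩ := splitGo_head ((str1.toList ++ [' ']).length + 1) (Int.toNat 1)
      (str1.toList ++ [' ']) [] (by omega) (by norm_num)
  rw [ht]
  simp only [List.reverse_nil, List.nil_append, List.map_cons, Option.map_some]
  rw [takeWhile_append_stop _ _ _ (by simp)]
  simp [PySem.Str.len]

-- ===== VERDICT (by name: the statement is the Claim_ definition above) =====
theorem iIndexOf_spec : Claim_equal_iIndexOf := by
  intro str1 _
  unfold Spec_iIndexOf
  rw [iIndexOf_eq_canon, iIndexOf_alt_eq_canon]
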